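-- pv_equiv track=rewrite | github.com/gmontana/DecodingViewerEmotions | mvlib/mvideo_lib.py | filter_duplicate
-- ===== SOURCE A (Python) =====
-- def filter_duplicate(array_ID):
--     filter = {}
--     array_ID_filtered = []
--     for [VID, t, eid, dV] in array_ID:
--         if t in filter:
--             if dV > filter[t]:
--                 filter[t] = dV
--         else:
--             filter[t] = dV
--     filter2 = {}
--     for [VID, t, eid, dV] in array_ID:
--         if t in filter2: continue
--         if filter[t] == dV:
--             array_ID_filtered.append([VID, t, eid])
--             filter2[t] = 1
--     return array_ID_filtered
-- ===== SOURCE B (Python) =====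
-- def filter_duplicate(array_ID):
--     array_ID_filtered = []
--     for i, [VID, t, eid, dV] in enumerate(array_ID):
--         if all(d < dV for _, u, _, d in array_ID[:i] if u == t) and \
--            all(d <= dV for _, u, _, d in array_ID[i + 1:] if u == t):
--             array_ID_filtered.append([VID, t, eid])
--     return array_ID_filtered
-- ===== Notes on version B (the rewrite author's own statement) =====
-- stated objective: simpler
-- what changed: Replaces A's two dict-building passes (max-per-t table, then a rescan with a seen-set) by one declarative pass that keeps row i iff every earlier row with the same t has strictly smaller dV and every later one has dV <= dV_i; no dictionaries and no second scan.
import Mathlib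
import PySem

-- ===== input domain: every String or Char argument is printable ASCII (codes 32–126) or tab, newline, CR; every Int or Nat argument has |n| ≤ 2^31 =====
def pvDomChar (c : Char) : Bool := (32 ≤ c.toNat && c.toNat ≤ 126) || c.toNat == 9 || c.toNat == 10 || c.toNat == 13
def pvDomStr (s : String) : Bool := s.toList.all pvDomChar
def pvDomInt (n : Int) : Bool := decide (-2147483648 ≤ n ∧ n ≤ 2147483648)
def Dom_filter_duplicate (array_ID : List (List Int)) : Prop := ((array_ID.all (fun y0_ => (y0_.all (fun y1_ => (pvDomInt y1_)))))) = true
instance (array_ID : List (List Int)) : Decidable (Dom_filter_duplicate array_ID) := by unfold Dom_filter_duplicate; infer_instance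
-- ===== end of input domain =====

-- B replaces A's two dict passes by one declarative "is this row the first maximal-dV row for its t" pass: simpler, no dicts (O(n^2) instead of O(n)).

-- ===== PORT A =====
-- first loop: filter[t] := max dV seen for t (strictly-greater update)
def fdA1 : List (List Int) → PySem.Dict Int Int → PySem.Dict Int Int
  | [], f => f
  | [_, t, _, dV] :: rest, f =>
      match f.get? t with
      | some cur => fdA1 rest (if cur < dV then f.insert t dV else f)
      | none => fdA1 rest (f.insert t dV)
  | _ :: rest, f => fdA1 rest f

-- second loop: emit first row per t whose dV equals the recorded max, marking t in filter2
def fdA2 (f : PySem.Dict Int Int) : List (List Int) → PySem.Dict Int Int → List (List Int) → List (List Int)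
  | [], _, acc => acc
  | [vid, t, eid, dV] :: rest, f2, acc =>
      if f2.contains t then fdA2 f rest f2 acc
      else if f.getD t 0 == dV then fdA2 f rest (f2.insert t (1 : Int)) (acc ++ [[vid, t, eid]])
      else fdA2 f rest f2 acc
  | _ :: rest, f2, acc => fdA2 f rest f2 acc

def filter_duplicate (array_ID : List (List Int)) : List (List Int) :=
  fdA2 (fdA1 array_ID PySem.Dict.empty) array_ID PySem.Dict.empty []

-- ===== PORT B =====
-- the two generator 'all's of Source B, over array_ID[:i] and array_ID[i+1:]
def fdB_keep (array_ID : List (List Int)) (i t dV : Int) : Bool :=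
  ((PySem.List.slice array_ID none (some i)).all fun r =>
      match r with
      | [_, u, _, d] => !(u == t) || decide (d < dV)
      | _ => true) &&
  ((PySem.List.slice array_ID (some (i + 1)) none).all fun r =>
      match r with
      | [_, u, _, d] => !(u == t) || decide (d ≤ dV)
      | _ => true)

def filter_duplicate_alt (array_ID : List (List Int)) : List (List Int) :=
  (PySem.List.enumerate array_ID).foldl (fun acc p =>
    match p with
    | (i, [vid, t, eid, dV]) =>
        if fdB_keep array_ID i t dV then acc ++ [[vid, t, eid]] else acc
    | _ => acc) []

-- ===== PRECONDITION & SPEC =====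
-- Pre_ excludes rows that are not 4-element lists: on those the unpacking '[VID, t, eid, dV]' raises ValueError in A (and in B).
def Pre_filter_duplicate (array_ID : List (List Int)) : Prop := ∀ r ∈ array_ID, r.length = 4
instance (array_ID : List (List Int)) : Decidable (Pre_filter_duplicate array_ID) := by unfold Pre_filter_duplicate; infer_instance
def pvWitness_filter_duplicate : List (List Int) := [[1, 2, 3, 4], [5, 2, 6, 7], [8, 9, 10, 7]]

def Spec_filter_duplicate (array_ID : List (List Int)) (out : List (List Int)) : Prop := out = filter_duplicate_alt array_ID
instance (array_ID : List (List Int)) (out : List (List Int)) : Decidable (Spec_filter_duplicate array_ID out) := by unfold Spec_filter_duplicate; infer_instance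

-- ===== CLAIM (what is proved, stated in full; the proofs are below) =====
def Claim_equal_filter_duplicate : Prop := ∀ (array_ID : List (List Int)), Dom_filter_duplicate array_ID → Pre_filter_duplicate array_ID → Spec_filter_duplicate array_ID (filter_duplicate array_ID)

-- ===== LEMMAS AND PROOFS =====

def kOf : List Int → Int
  | [_, t, _, _] => t
  | _ => 0

def dOf : List Int → Int
  | [_, _, _, d] => d
  | _ => 0

def dvs (t : Int) (rows : List (List Int)) : List Int :=
  (rows.filter fun r => kOf r == t).map dOf

def omax : Option Int → Int → Option Int
  | some c, d => some (if c < d then d else c)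
  | none, d => some d

lemma shape4 (r : List Int) (h : r.length = 4) :
    ∃ a b c d, r = [a, b, c, d] := by
  match r, h with
  | [a, b, c, d], _ => exact ⟨a, b, c, d, rfl⟩

lemma fdA1_get (rows : List (List Int)) (f : PySem.Dict Int Int) (t : Int)
    (h : ∀ r ∈ rows, r.length = 4) :
    (fdA1 rows f).get? t = (dvs t rows).foldl omax (f.get? t) := by
  induction rows generalizing f with
  | nil => simp [fdA1, dvs]
  | cons r rest ih =>
    obtain ⟨v, u, e, d, rfl⟩ := shape4 r (h r (List.mem_cons_self ..))
    have hrest : ∀ r ∈ rest, r.length = 4 := fun r hr => h r (List.mem_cons_of_mem _ hr)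
    by_cases hu : u = t
    · subst hu
      have hdvs : dvs u ([v, u, e, d] :: rest) = d :: dvs u rest := by
        simp [dvs, kOf, dOf]
      simp only [fdA1]
      cases hf : f.get? u with
      | none =>
        simp only [hdvs, ih _ hrest, List.foldl_cons, omax,
          PySem.Dict.get?_insert_self]
      | some cur =>
        by_cases hlt : cur < d
        · simp only [hdvs, if_pos hlt, ih _ hrest, List.foldl_cons, omax,
            PySem.Dict.get?_insert_self]
        · simp only [hdvs, if_neg hlt, ih _ hrest, List.foldl_cons, hf, omax]
    · have hne : t ≠ u := fun hh => hu hh.symm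
      have hdvs : dvs t ([v, u, e, d] :: rest) = dvs t rest := by
        simp [dvs, kOf, hu]
      simp only [fdA1]
      cases hf : f.get? u with
      | none =>
        simp only [hdvs, ih _ hrest, PySem.Dict.get?_insert_of_ne _ _ hne]
      | some cur =>
        by_cases hlt : cur < d
        · simp only [hdvs, if_pos hlt, ih _ hrest,
            PySem.Dict.get?_insert_of_ne _ _ hne]
        · simp only [hdvs, if_neg hlt, ih _ hrest]

lemma foldl_omax_some (l : List Int) (c : Int) :
    ∃ m, l.foldl omax (some c) = some m ∧ c ≤ m ∧ (m = c ∨ m ∈ l) ∧ ∀ x ∈ l, x ≤ m := by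
  induction l generalizing c with
  | nil => exact ⟨c, rfl, le_refl c, Or.inl rfl, by simp⟩
  | cons d l ih =>
    obtain ⟨m, hm, hcm, hmem, hub⟩ := ih (if c < d then d else c)
    refine ⟨m, by simpa [omax] using hm, ?_, ?_, ?_⟩
    · split at hcm <;> omega
    · rcases hmem with h | h
      · split at h <;> subst h
        · exact Or.inr (List.mem_cons_self ..)
        · exact Or.inl rfl
      · exact Or.inr (List.mem_cons_of_mem _ h)
    · intro x hx
      rcases List.mem_cons.mp hx with rfl | hx
      · split at hcm <;> omega
      · exact hub x hx

lemma dvs_max (t : Int) (rows : List (List Int)) (d : Int) (hd : d ∈ dvs t rows) :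
    ∃ m, (dvs t rows).foldl omax none = some m ∧ m ∈ dvs t rows ∧ d ≤ m ∧
      ∀ x ∈ dvs t rows, x ≤ m := by
  cases hdvs : dvs t rows with
  | nil => rw [hdvs] at hd; simp at hd
  | cons d0 l0 =>
    obtain ⟨m, hm, hd0m, hmem, hub⟩ := foldl_omax_some l0 d0
    have hub' : ∀ x ∈ d0 :: l0, x ≤ m := by
      intro x hx
      rcases List.mem_cons.mp hx with rfl | hx
      · exact hd0m
      · exact hub x hx
    rw [hdvs] at hd
    refine ⟨m, by simpa [omax] using hm, ?_, hub' d hd, hub'⟩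
    rcases hmem with rfl | h
    · exact List.mem_cons_self ..
    · exact List.mem_cons_of_mem _ h

lemma mem_dvs_iff (t : Int) (rows : List (List Int)) (m : Int) :
    m ∈ dvs t rows ↔ ∃ r ∈ rows, kOf r = t ∧ dOf r = m := by
  simp only [dvs, List.mem_map, List.mem_filter, beq_iff_eq]
  constructor
  · rintro ⟨r, ⟨hr, hk⟩, hdv⟩; exact ⟨r, hr, hk, hdv⟩
  · rintro ⟨r, hr, hk, hdv⟩; exact ⟨r, ⟨hr, hk⟩, hdv⟩

def bGo (rows : List (List Int)) : Int → List (List Int) → List (List Int)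
  | _, [] => []
  | i, r :: rest =>
      (match r with
       | [v, t, e, d] => if fdB_keep rows i t d then [[v, t, e]] else []
       | _ => []) ++ bGo rows (i + 1) rest

lemma foldl_enum_bGo (rows : List (List Int)) (suf : List (List Int))
    (h : ∀ r ∈ suf, r.length = 4) :
    ∀ (i : Int) (acc : List (List Int)),
      (PySem.List.enumerate suf i).foldl (fun acc p =>
        match p with
        | (i, [vid, t, eid, dV]) =>
            if fdB_keep rows i t dV then acc ++ [[vid, t, eid]] else acc
        | _ => acc) acc = acc ++ bGo rows i suf := by
  induction suf with
  | nil => intro i acc; simp [bGo, PySem.List.enumerate]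
  | cons r rest ih =>
    intro i acc
    obtain ⟨v, t, e, d, rfl⟩ := shape4 r (h r (List.mem_cons_self ..))
    have hrest : ∀ r ∈ rest, r.length = 4 := fun r hr => h r (List.mem_cons_of_mem _ hr)
    rw [PySem.List.enumerate_cons, List.foldl_cons]
    by_cases hk : fdB_keep rows i t d = true
    · simp [bGo, hk, ih hrest]
    · simp only [Bool.not_eq_true] at hk
      simp [bGo, hk, ih hrest]

lemma alt_eq_bGo (rows : List (List Int)) (h : ∀ r ∈ rows, r.length = 4) :
    filter_duplicate_alt rows = bGo rows 0 rows := by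
  simpa using foldl_enum_bGo rows rows h 0 []

lemma keep_iff (pre suf : List (List Int)) (v t e d : Int)
    (h : ∀ r ∈ pre ++ [v, t, e, d] :: suf, r.length = 4) :
    fdB_keep (pre ++ [v, t, e, d] :: suf) (pre.length : Int) t d = true ↔
      (∀ r ∈ pre, kOf r = t → dOf r < d) ∧ (∀ r ∈ suf, kOf r = t → dOf r ≤ d) := by
  have hpre : ∀ r ∈ pre, r.length = 4 := fun r hr =>
    h r (List.mem_append_left _ hr)
  have hsuf : ∀ r ∈ suf, r.length = 4 := fun r hr =>
    h r (List.mem_append_right _ (List.mem_cons_of_mem _ hr))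
  have h1 : PySem.List.slice (pre ++ [v, t, e, d] :: suf) none (some (pre.length : Int)) = pre := by
    rw [PySem.List.slice_to_natCast]
    exact List.take_left
  have h2 : PySem.List.slice (pre ++ [v, t, e, d] :: suf) (some ((pre.length : Int) + 1)) none = suf := by
    have hc : (pre.length : Int) + 1 = ((pre.length + 1 : Nat) : Int) := by push_cast; ring
    rw [hc, PySem.List.slice_from_natCast]
    have hsplit : pre ++ [v, t, e, d] :: suf = (pre ++ [[v, t, e, d]]) ++ suf := by simp
    rw [hsplit, List.drop_left' (by simp)]
  have elem_lt : ∀ r ∈ pre,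
      ((match r with
        | [_, u, _, dd] => !(u == t) || decide (dd < d)
        | _ => true) = true) ↔ (kOf r = t → dOf r < d) := by
    intro r hr
    obtain ⟨a, b, c, d0, rfl⟩ := shape4 r (hpre r hr)
    by_cases hb : b = t <;> simp [kOf, dOf, hb]
  have elem_le : ∀ r ∈ suf,
      ((match r with
        | [_, u, _, dd] => !(u == t) || decide (dd ≤ d)
        | _ => true) = true) ↔ (kOf r = t → dOf r ≤ d) := by
    intro r hr
    obtain ⟨a, b, c, d0, rfl⟩ := shape4 r (hsuf r hr)
    by_cases hb : b = t <;> simp [kOf, dOf, hb]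
  rw [fdB_keep, Bool.and_eq_true, h1, h2, List.all_eq_true, List.all_eq_true]
  constructor
  · rintro ⟨ha, hb⟩
    exact ⟨fun r hr => (elem_lt r hr).mp (ha r hr), fun r hr => (elem_le r hr).mp (hb r hr)⟩
  · rintro ⟨ha, hb⟩
    exact ⟨fun r hr => (elem_lt r hr).mpr (ha r hr), fun r hr => (elem_le r hr).mpr (hb r hr)⟩

lemma main_loop (suf pre : List (List Int)) (f2 : PySem.Dict Int Int) (acc : List (List Int))
    (h : ∀ r ∈ pre ++ suf, r.length = 4)
    (hinv : ∀ t, f2.contains t = true ↔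
        ∃ r ∈ pre, kOf r = t ∧ (fdA1 (pre ++ suf) PySem.Dict.empty).get? t = some (dOf r)) :
    fdA2 (fdA1 (pre ++ suf) PySem.Dict.empty) suf f2 acc =
      acc ++ bGo (pre ++ suf) (pre.length : Int) suf := by
  induction suf generalizing pre f2 acc with
  | nil => simp [fdA2, bGo]
  | cons r suf ih =>
    obtain ⟨v, t, e, d, rfl⟩ := shape4 r
      (h r (List.mem_append_right _ (List.mem_cons_self ..)))
    have hcast : ((pre ++ [[v, t, e, d]]).length : Int) = (pre.length : Int) + 1 := by
      push_cast [List.length_append]; simp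
    have happ : (pre ++ [[v, t, e, d]]) ++ suf = pre ++ [v, t, e, d] :: suf := by simp
    have hd_mem : d ∈ dvs t (pre ++ [v, t, e, d] :: suf) := by
      rw [mem_dvs_iff]
      exact ⟨[v, t, e, d], List.mem_append_right _ (List.mem_cons_self ..), rfl, rfl⟩
    obtain ⟨m, hm, hmmem, hdm, hub⟩ := dvs_max t _ d hd_mem
    have hFget : (fdA1 (pre ++ [v, t, e, d] :: suf) PySem.Dict.empty).get? t = some m := by
      rw [fdA1_get _ _ _ h, PySem.Dict.get?_empty, hm]
    have hFgetD : (fdA1 (pre ++ [v, t, e, d] :: suf) PySem.Dict.empty).getD t 0 = m :=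
      PySem.Dict.getD_of_get?_eq_some _ 0 hFget
    have hub' : ∀ r ∈ pre ++ [v, t, e, d] :: suf, kOf r = t → dOf r ≤ m := by
      intro r hr hk
      exact hub (dOf r) ((mem_dvs_iff t _ (dOf r)).mpr ⟨r, hr, hk, rfl⟩)
    simp only [fdA2, bGo]
    by_cases hc : f2.contains t = true
    · -- t already emitted: A skips; B's keep is false via the earlier winner
      obtain ⟨r', hr', hkr', hgr'⟩ := (hinv t).mp hc
      have hdm' : dOf r' = m := by
        rw [hFget] at hgr'; exact (Option.some.injEq _ _ ▸ hgr'.symm)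
      have hkeep : ¬ fdB_keep (pre ++ [v, t, e, d] :: suf) (pre.length : Int) t d = true := by
        rw [keep_iff pre suf v t e d h]
        rintro ⟨h1, -⟩
        have := h1 r' hr' hkr'
        omega
      rw [if_pos hc]
      simp only [Bool.not_eq_true] at hkeep
      rw [hkeep]
      have hmain := ih (pre ++ [[v, t, e, d]]) f2 acc (by rw [happ]; exact h) ?_
      · rw [happ, hcast] at hmain
        simpa using hmain
      · intro t'
        rw [happ, hinv t']
        constructor
        · rintro ⟨r0, hr0, hk0, hg0⟩
          exact ⟨r0, List.mem_append_left _ hr0, hk0, hg0⟩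
        · rintro ⟨r0, hr0, hk0, hg0⟩
          rcases List.mem_append.mp hr0 with h0 | h0
          · exact ⟨r0, h0, hk0, hg0⟩
          · simp only [List.mem_singleton] at h0
            subst h0
            simp only [kOf] at hk0
            subst hk0
            exact ⟨r', hr', hkr', hgr'⟩
    · rw [if_neg hc]
      by_cases heq : ((fdA1 (pre ++ [v, t, e, d] :: suf) PySem.Dict.empty).getD t 0 == d) = true
      · -- this row is the first max row for t: both emit it
        have hmd : m = d := by rw [hFgetD] at heq; exact beq_iff_eq.mp heq
        rw [hmd] at hub' hFget
        have hkeep : fdB_keep (pre ++ [v, t, e, d] :: suf) (pre.length : Int) t d = true := by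
          rw [keep_iff pre suf v t e d h]
          constructor
          · intro r0 hr0 hk0
            have hle := hub' r0 (List.mem_append_left _ hr0) hk0
            rcases lt_or_eq_of_le hle with hlt | heq0
            · exact hlt
            · exfalso
              apply hc
              rw [hinv t]
              exact ⟨r0, hr0, hk0, by rw [hFget, heq0]⟩
          · intro r0 hr0 hk0
            exact hub' r0 (List.mem_append_right _ (List.mem_cons_of_mem _ hr0)) hk0
        rw [if_pos heq, hkeep]
        have hmain := ih (pre ++ [[v, t, e, d]]) (f2.insert t 1) (acc ++ [[v, t, e]])
          (by rw [happ]; exact h) ?_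
        · rw [happ, hcast] at hmain
          rw [hmain]
          simp
        · intro t'
          rw [happ]
          by_cases ht' : t' = t
          · subst ht'
            simp only [PySem.Dict.contains_insert_self, true_iff]
            exact ⟨[v, t', e, d], List.mem_append_right _ (List.mem_cons_self ..), rfl, by
              rw [hFget]; rfl⟩
          · rw [PySem.Dict.contains_insert]
            have : (t' == t) = false := beq_eq_false_iff_ne.mpr ht'
            rw [this, Bool.false_or, hinv t']
            constructor
            · rintro ⟨r0, hr0, hk0, hg0⟩
              exact ⟨r0, List.mem_append_left _ hr0, hk0, hg0⟩
            · rintro ⟨r0, hr0, hk0, hg0⟩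
              rcases List.mem_append.mp hr0 with h0 | h0
              · exact ⟨r0, h0, hk0, hg0⟩
              · exfalso
                simp only [List.mem_singleton] at h0
                subst h0
                simp only [kOf] at hk0
                exact ht' hk0.symm
      · -- not the max row: both skip
        have hmd : m ≠ d := by
          intro hmd
          apply heq
          rw [hFgetD, hmd]
          exact beq_self_eq_true _
        have hdm2 : d < m := lt_of_le_of_ne hdm (fun hh => hmd hh.symm)
        obtain ⟨r0, hr0, hk0, hd0⟩ := (mem_dvs_iff t _ m).mp hmmem
        have hkeep : ¬ fdB_keep (pre ++ [v, t, e, d] :: suf) (pre.length : Int) t d = true := by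
          rw [keep_iff pre suf v t e d h]
          rintro ⟨h1, h2⟩
          rcases List.mem_append.mp hr0 with h0 | h0
          · have := h1 r0 h0 hk0; omega
          · rcases List.mem_cons.mp h0 with h0 | h0
            · subst h0
              simp only [dOf] at hd0
              omega
            · have := h2 r0 h0 hk0; omega
        rw [if_neg heq]
        simp only [Bool.not_eq_true] at hkeep
        rw [hkeep]
        have hmain := ih (pre ++ [[v, t, e, d]]) f2 acc (by rw [happ]; exact h) ?_
        · rw [happ, hcast] at hmain
          simpa using hmain
        · intro t'
          rw [happ, hinv t']
          constructor
          · rintro ⟨rr, hrr, hkrr, hgrr⟩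
            exact ⟨rr, List.mem_append_left _ hrr, hkrr, hgrr⟩
          · rintro ⟨rr, hrr, hkrr, hgrr⟩
            rcases List.mem_append.mp hrr with h0 | h0
            · exact ⟨rr, h0, hkrr, hgrr⟩
            · exfalso
              simp only [List.mem_singleton] at h0
              subst h0
              simp only [kOf] at hkrr
              subst hkrr
              simp only [dOf] at hgrr
              rw [hFget] at hgrr
              exact hmd (Option.some.injEq _ _ ▸ hgrr)

-- ===== VERDICT (by name: the statement is the Claim_ definition above) =====
theorem filter_duplicate_spec : Claim_equal_filter_duplicate := by
  intro rows _ hpre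
  unfold Spec_filter_duplicate filter_duplicate
  rw [alt_eq_bGo _ hpre]
  have := main_loop rows [] PySem.Dict.empty [] (by simpa using hpre)
    (by intro t; simp)
  simpa using this
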